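-- pv_equiv track=rewrite | github.com/LeonieVS/thesis | thesis.py | transform
-- ===== SOURCE A (Python) =====
-- from collections import defaultdict
-- import string #om de punctuation op te lijsten
--
-- def transform(tekst):
--     punct_stats = []
--     punctuations = list(string.punctuation)
--     additional_punc = ["``", "--", "\"\""]
--     punctuations.extend(additional_punc)
--     for artikel in tekst:
--         puncts = defaultdict(int)
--         for ch in artikel:
--             if ch in punctuations:
--                 puncts[ch]+=1
--         punct_stats.append(puncts)
--     return punct_stats
-- ===== SOURCE B (Python) =====
-- from collections import defaultdict
-- import string
--
--
-- def article_stats(artikel, punct):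
--     kept = [ch for ch in artikel if ch in punct]
--     d = defaultdict(int)
--     for ch in dict.fromkeys(kept):
--         d[ch] = kept.count(ch)
--     return d
--
--
-- def transform(tekst):
--     punct = set(string.punctuation) | {"``", "--", "\"\""}
--     return [article_stats(artikel, punct) for artikel in tekst]
-- ===== Notes on version B (the rewrite author's own statement) =====
-- stated objective: alternative
-- what changed: A counts incrementally, incrementing a defaultdict entry for every punctuation character as it scans; B uses staged passes with no incremental counting: it filters the article down to its punctuation characters, takes the ordered dedup of that filtered list (dict.fromkeys), and assigns each distinct character its total via list.count.
import Mathlib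
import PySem

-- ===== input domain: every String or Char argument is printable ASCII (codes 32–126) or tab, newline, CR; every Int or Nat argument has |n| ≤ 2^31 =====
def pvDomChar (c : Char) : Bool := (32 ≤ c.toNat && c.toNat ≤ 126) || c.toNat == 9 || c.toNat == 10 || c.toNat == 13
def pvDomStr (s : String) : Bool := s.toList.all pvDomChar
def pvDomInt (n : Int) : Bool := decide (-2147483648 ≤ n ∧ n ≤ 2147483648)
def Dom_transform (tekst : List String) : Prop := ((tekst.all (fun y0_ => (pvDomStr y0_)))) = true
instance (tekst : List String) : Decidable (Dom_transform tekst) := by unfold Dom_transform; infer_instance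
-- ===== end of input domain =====

-- B replaces A's incremental per-character counting with staged passes: filter to punctuation,
-- ordered dedup, then count each distinct character (objective: alternative).

-- string.punctuation as a list of one-char strings, plus the three extra tokens (shared module-level data of both versions)
def pyPunctList : List String :=
  ["!", "\"", "#", "$", "%", "&", "'", "(", ")", "*", "+", ",", "-", ".", "/",
   ":", ";", "<", "=", ">", "?", "@", "[", "\\", "]", "^", "_", "`", "{", "|", "}", "~",
   "``", "--", "\"\""]

-- ===== PORT A =====
def transform (tekst : List String) : List (List (String × Int)) :=
  tekst.foldl
    (fun punct_stats artikel =>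
      punct_stats ++
        [(artikel.toList.foldl
            (fun puncts c =>
              if pyPunctList.contains (String.singleton c) then
                puncts.modify (String.singleton c) 0 (· + 1)
              else puncts)
            (PySem.Dict.empty : PySem.Dict String Int)).items])
    []

-- ===== PORT B =====
def pyPunctSet : PySem.Set String := PySem.Set.ofList pyPunctList

def articleStats (artikel : String) (punct : PySem.Set String) : List (String × Int) :=
  let kept := (artikel.toList.map String.singleton).filter (fun s => PySem.Set.contains punct s)
  ((PySem.List.dedup kept).foldl
      (fun (d : PySem.Dict String Int) ch => d.insert ch ((kept.count ch : Int)))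
      PySem.Dict.empty).items

def transform_alt (tekst : List String) : List (List (String × Int)) :=
  tekst.map (fun artikel => articleStats artikel pyPunctSet)

-- ===== PRECONDITION & SPEC =====
def Spec_transform (tekst : List String) (out : List (List (String × Int))) : Prop := out = transform_alt tekst
instance (tekst : List String) (out : List (List (String × Int))) : Decidable (Spec_transform tekst out) := by unfold Spec_transform; infer_instance

-- ===== CLAIM (what is proved, stated in full; the proofs are below) =====
def Claim_equal_transform : Prop := ∀ (tekst : List String), Dom_transform tekst → Spec_transform tekst (transform tekst)

-- ===== LEMMAS AND PROOFS =====

theorem article_eq (artikel : String) :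
    (artikel.toList.foldl
        (fun puncts c =>
          if pyPunctList.contains (String.singleton c) then
            puncts.modify (String.singleton c) 0 (· + 1)
          else puncts)
        (PySem.Dict.empty : PySem.Dict String Int)).items
      = articleStats artikel pyPunctSet := by
  unfold articleStats
  have hmem : ∀ s : String, PySem.Set.contains pyPunctSet s = pyPunctList.contains s := by
    intro s
    simp [pyPunctSet, PySem.Set.contains_eq_listContains, PySem.Set.mem_ofList]
  -- A's side: fold with test = fold over the filtered list = Counter of kept
  rw [PySem.List.foldl_if_eq_foldl_filter]
  -- move the fold from chars to singleton strings
  rw [← List.foldl_map (f := String.singleton)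
    (g := fun (d : PySem.Dict String Int) s => d.modify s 0 (· + 1))]
  have hlist : (artikel.toList.filter (fun c => pyPunctList.contains (String.singleton c))).map String.singleton
      = (artikel.toList.map String.singleton).filter (fun s => PySem.Set.contains pyPunctSet s) := by
    rw [List.filter_map]
    refine congrArg _ (List.filter_congr ?_)
    intro c _
    simp [Function.comp, pyPunctSet, PySem.Set.mem_ofList]
  rw [hlist, ← PySem.Dict.counter_eq_foldl, PySem.Dict.items_counter]
  -- B's side: fresh-key insertions over the dedup append their pairs
  set kept := (artikel.toList.map String.singleton).filter (fun s => PySem.Set.contains pyPunctSet s) with hk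
  have hfresh := PySem.Dict.items_foldl_insert_fresh
    (l := PySem.List.dedup kept) (k := fun s => s) (v := fun s => ((kept.count s : Int)))
    (d := (PySem.Dict.empty : PySem.Dict String Int))
    (by intro a _; rfl) (by simp)
  simp only [PySem.Dict.empty, List.nil_append] at hfresh
  simpa [PySem.List.dedup_eq_ofList] using hfresh.symm

-- ===== VERDICT (by name: the statement is the Claim_ definition above) =====
theorem transform_spec : Claim_equal_transform := by
  intro tekst _
  show transform tekst = transform_alt tekst
  unfold transform transform_alt
  rw [PySem.List.foldl_append_singleton_eq_map, List.nil_append]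
  exact List.map_congr_left (fun artikel _ => article_eq artikel)
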